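-- pv_equiv track=rewrite | github.com/harinivasanc2000/calorie_calculator | calories_calc/main.py | tokenize_rulebased
-- ===== SOURCE A (Python) =====
-- import string
--
-- def tokenize_rulebased(text):
--   # your code!
--   prev_c = ' ' # Keep track of the previous character (and set as a space initially)
--   tokens = []
--
--   # Loop through each character in the text
--   for c in text:
--       if not c in string.whitespace:
--           if prev_c in string.whitespace:
--               is_new_token=True
--           elif c in string.ascii_letters and not prev_c in string.ascii_letters:
--               is_new_token=True
--           elif c in string.punctuation and not prev_c in string.punctuation:
--               is_new_token = True
--           elif c in string.digits and not prev_c in string.digits: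
--               is_new_token = True
--           else: # This is continuation of a token
--               is_new_token=False
--           if is_new_token:
--               tokens.append(c)
--           else:
--               tokens[-1]+=c
--       prev_c=c
--   return tokens
-- ===== SOURCE B (Python) =====
-- import string
--
-- def _cls(c):
--     if c in string.whitespace:
--         return 'w'
--     if c in string.ascii_letters:
--         return 'a'
--     if c in string.digits:
--         return 'd'
--     if c in string.punctuation:
--         return 'p'
--     return 'o'
--
-- def tokenize_rulebased(text):
--     tokens = []
--     i = 0
--     n = len(text)
--     while i < n:
--         k = _cls(text[i])
--         if k == 'w':
--             i += 1
--         else: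
--             j = i + 1
--             while j < n and _cls(text[j]) == k:
--                 j += 1
--             tokens.append(text[i:j])
--             i = j
--     return tokens
-- ===== Notes on version B (the rewrite author's own statement) =====
-- stated objective: faster
-- what changed: Replaces A's per-character state machine (tracking the previous character and repeatedly rebuilding the last token with tokens[-1]+=c) by a two-level run scanner that classifies the current character once and slices out each maximal same-class run as a whole token.
import Mathlib
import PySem

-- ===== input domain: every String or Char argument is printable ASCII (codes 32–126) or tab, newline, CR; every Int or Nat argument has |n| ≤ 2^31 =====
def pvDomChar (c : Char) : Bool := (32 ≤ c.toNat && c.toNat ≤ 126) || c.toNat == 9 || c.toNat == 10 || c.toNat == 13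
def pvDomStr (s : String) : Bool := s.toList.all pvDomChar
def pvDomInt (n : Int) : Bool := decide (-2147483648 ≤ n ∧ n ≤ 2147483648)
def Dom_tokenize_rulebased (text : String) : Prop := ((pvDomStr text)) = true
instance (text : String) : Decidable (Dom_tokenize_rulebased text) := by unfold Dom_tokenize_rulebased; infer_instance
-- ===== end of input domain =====

-- B replaces A's per-character state machine (mutating tokens[-1]) by a run scanner that
-- emits each maximal same-class run as one slice; same return value on Dom (objective: alternative).

-- ===== PORT A =====
-- membership in Python's string.whitespace / ascii_letters / digits / punctuation,
-- encoded exactly by character codes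
def pvWs (c : Char) : Bool :=
  c.toNat == 32 || c.toNat == 9 || c.toNat == 10 || c.toNat == 13 || c.toNat == 11 || c.toNat == 12
def pvLetter (c : Char) : Bool :=
  (97 ≤ c.toNat && c.toNat ≤ 122) || (65 ≤ c.toNat && c.toNat ≤ 90)
def pvDigit (c : Char) : Bool := 48 ≤ c.toNat && c.toNat ≤ 57
def pvPunct (c : Char) : Bool :=
  (33 ≤ c.toNat && c.toNat ≤ 47) || (58 ≤ c.toNat && c.toNat ≤ 64) ||
  (91 ≤ c.toNat && c.toNat ≤ 96) || (123 ≤ c.toNat && c.toNat ≤ 126)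

-- `tokens[-1] += c`; the [] case is unreachable in A (Python would raise, but the else
-- branch is only reached after at least one append)
def pvAppendLast : List (List Char) → Char → List (List Char)
  | [], _ => []
  | [t], c => [t ++ [c]]
  | t :: ts, c => t :: pvAppendLast ts c

-- the is_new_token cascade, in A's branch order
def pvIsNew (prev c : Char) : Bool :=
  if pvWs prev then true
  else if pvLetter c && !(pvLetter prev) then true
  else if pvPunct c && !(pvPunct prev) then true
  else if pvDigit c && !(pvDigit prev) then true
  else false

def pvAStep (st : Char × List (List Char)) (c : Char) : Char × List (List Char) :=
  if !(pvWs c) then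
    if pvIsNew st.1 c then (c, st.2 ++ [[c]])
    else (c, pvAppendLast st.2 c)
  else (c, st.2)

def tokenize_rulebased (text : String) : List String :=
  ((text.toList.foldl pvAStep (' ', [])).2).map (fun t => String.ofList t)

-- ===== PORT B =====
-- Source B's _cls, in Source B's test order
def pvCls (c : Char) : Char :=
  if pvWs c then 'w'
  else if pvLetter c then 'a'
  else if pvDigit c then 'd'
  else if pvPunct c then 'p'
  else 'o'

-- Source B's outer while loop; the inner `while j < n and _cls(text[j]) == k` + slice
-- is takeWhile/dropWhile on the remainder
def pvAltGo (l : List Char) : List (List Char) :=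
  match l with
  | [] => []
  | c :: rest =>
    let k := pvCls c
    if k == 'w' then pvAltGo rest
    else (c :: rest.takeWhile (fun x => pvCls x == k)) :: pvAltGo (rest.dropWhile (fun x => pvCls x == k))
termination_by l.length
decreasing_by
  all_goals
    have := List.length_dropWhile_le (p := fun x => pvCls x == pvCls c) (l := rest)
    simp only [List.length_cons]
    omega

def tokenize_rulebased_alt (text : String) : List String :=
  (pvAltGo text.toList).map (fun t => String.ofList t)

-- ===== PRECONDITION & SPEC =====
def Spec_tokenize_rulebased (text : String) (out : List String) : Prop := out = tokenize_rulebased_alt text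
instance (text : String) (out : List String) : Decidable (Spec_tokenize_rulebased text out) := by unfold Spec_tokenize_rulebased; infer_instance

-- ===== CLAIM (what is proved, stated in full; the proofs are below) =====
def Claim_equal_tokenize_rulebased : Prop := ∀ (text : String), Dom_tokenize_rulebased text → Spec_tokenize_rulebased text (tokenize_rulebased text)

-- ===== LEMMAS AND PROOFS =====

lemma pvCls_eq_w (c : Char) : (pvCls c == 'w') = pvWs c := by
  unfold pvCls; split_ifs <;> simp_all

set_option maxHeartbeats 2000000 in
lemma pvIsNew_eq (prev c : Char) (hp : pvDomChar prev = true) (hc : pvDomChar c = true)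
    (hws : pvWs c = false) : pvIsNew prev c = !(pvCls c == pvCls prev) := by
  unfold pvIsNew pvCls
  cases hWp : pvWs prev <;> cases hLc : pvLetter c <;> cases hLp : pvLetter prev <;>
    cases hDc : pvDigit c <;> cases hDp : pvDigit prev <;>
    cases hPc : pvPunct c <;> cases hPp : pvPunct prev <;>
    simp_all [pvDomChar, pvWs, pvLetter, pvDigit, pvPunct] <;> omega

lemma pvAppendLast_concat (ts : List (List Char)) (t : List Char) (c : Char) :
    pvAppendLast (ts ++ [t]) c = ts ++ [t ++ [c]] := by
  induction ts with
  | nil => rfl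
  | cons h tl ih =>
    cases tl with
    | nil => simp [pvAppendLast]
    | cons h' tl' => simpa [pvAppendLast] using ih

lemma fold_spec (l : List Char) (hl : ∀ c ∈ l, pvDomChar c = true) :
    (∀ prev toks, pvWs prev = true →
      (List.foldl pvAStep (prev, toks) l).2 = toks ++ pvAltGo l)
    ∧ (∀ prev ts t, pvDomChar prev = true → pvWs prev = false →
      (List.foldl pvAStep (prev, ts ++ [t]) l).2
        = ts ++ (t ++ l.takeWhile (fun x => pvCls x == pvCls prev))
            :: pvAltGo (l.dropWhile (fun x => pvCls x == pvCls prev))) := by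
  induction l with
  | nil => simp [pvAltGo]
  | cons c rest ih =>
    have hc : pvDomChar c = true := hl c (by simp)
    have hrest : ∀ x ∈ rest, pvDomChar x = true := fun x hx => hl x (by simp [hx])
    obtain ⟨ihA, ihB⟩ := ih hrest
    constructor
    · intro prev toks hprev
      by_cases hwc : pvWs c = true
      · -- whitespace: skipped by both
        simp [List.foldl, pvAStep, hwc, pvAltGo, pvCls_eq_w, ihA c toks hwc]
      · -- new token starts
        have hnew : pvIsNew prev c = true := by unfold pvIsNew; simp [hprev]
        have hkw : (pvCls c == 'w') = false := by rw [pvCls_eq_w]; simpa using hwc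
        have := ihB c toks [c] hc (by simpa using hwc)
        simp only [List.foldl, pvAStep, hwc, hnew, Bool.not_false, if_true] at this ⊢
        simp [this, pvAltGo, hkw]
    · intro prev ts t hpd hprev
      by_cases hwc : pvWs c = true
      · -- whitespace ends the current run
        have hcw : pvCls c = 'w' := by unfold pvCls; rw [if_pos hwc]
        have hpne : pvCls prev ≠ 'w' := by
          intro h
          have := pvCls_eq_w prev
          rw [h] at this
          simp [hprev] at this
        have hpc : (pvCls c == pvCls prev) = false := by
          simp only [beq_eq_false_iff_ne, ne_eq, hcw]
          exact fun h => hpne h.symm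
        have := ihA c (ts ++ [t]) hwc
        have hkw : (pvCls c == 'w') = true := by rw [pvCls_eq_w]; exact hwc
        simp only [List.foldl, pvAStep, hwc, Bool.not_true] at this ⊢
        simp [this, pvAltGo, hkw, List.takeWhile, List.dropWhile, hpc]
      · have hwc' : pvWs c = false := by simpa using hwc
        have hnew := pvIsNew_eq prev c hpd hc hwc'
        by_cases hsame : (pvCls c == pvCls prev) = true
        · -- same class: continuation, run keeps growing
          have hcont : pvIsNew prev c = false := by rw [hnew, hsame]; rfl
          have hfun : (fun x => pvCls x == pvCls prev) = (fun x => pvCls x == pvCls c) := by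
            funext x; rw [eq_of_beq hsame]
          have := ihB c ts (t ++ [c]) hc hwc'
          simp only [List.foldl, pvAStep, hwc', hcont, Bool.not_false, if_true, Bool.false_eq_true,
            if_false, pvAppendLast_concat] at this ⊢
          simp [this, List.takeWhile, List.dropWhile, hsame, hfun]
        · -- different class: new token
          have hsame' : (pvCls c == pvCls prev) = false := by simpa using hsame
          have hnew' : pvIsNew prev c = true := by rw [hnew, hsame']; rfl
          have hkw : (pvCls c == 'w') = false := by rw [pvCls_eq_w]; exact hwc'
          have := ihB c (ts ++ [t]) [c] hc hwc'
          simp only [List.foldl, pvAStep, hwc', hnew', Bool.not_false, if_true]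
          simp only [List.append_assoc, List.cons_append,
            List.nil_append] at this ⊢
          rw [this]
          simp [pvAltGo, hkw, List.takeWhile, List.dropWhile, hsame']

-- ===== VERDICT (by name: the statement is the Claim_ definition above) =====
theorem tokenize_rulebased_spec : Claim_equal_tokenize_rulebased := by
  intro text hdom
  unfold Spec_tokenize_rulebased tokenize_rulebased tokenize_rulebased_alt
  have hl : ∀ c ∈ text.toList, pvDomChar c = true := by
    have := hdom
    unfold Dom_tokenize_rulebased pvDomStr at this
    simpa [List.all_eq_true] using this
  have := (fold_spec text.toList hl).1 ' ' [] (by decide)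
  rw [this]
  simp
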